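-- pv_equiv track=rewrite | github.com/covertivy/pweb | OutputManager.py | __manage_lines
-- ===== SOURCE A (Python) =====
-- def __manage_lines(message: str, color: str, first_line_start: str, new_line_start: str):
--     """
--     This function formats the lines of the message.
--
--     @param message: The message to print.
--     @type message: str
--     @param color: The color to print the message in.
--     @type color: str
--     @param first_line_start: First line begins with this string.
--     @type first_line_start: str
--     @param new_line_start: Every new line begins with this string.
--     @type new_line_start: str
--     @return: The reformatted output string.
--     @rtype: str
--     """
--     index = 0
--     output = str()
--     for line in message.split("\n"):
--         if not index:
--             # First line.
--             output += f"{first_line_start}{color}{line}\n"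
--         else:
--             # Any other line.
--             output += f"{new_line_start}{color}{line}\n"
--         index += 1
--     return output
-- ===== SOURCE B (Python) =====
-- def __manage_lines(message: str, color: str, first_line_start: str, new_line_start: str):
--     """Single string replacement instead of split/loop/index."""
--     return f"{first_line_start}{color}" + message.replace("\n", f"\n{new_line_start}{color}") + "\n"
-- ===== Notes on version B (the rewrite author's own statement) =====
-- stated objective: idiomatic
-- what changed: Replaces the split/index-counting loop with a single str.replace that inserts the new-line prefix after every newline, plus one prepended first-line prefix and one trailing newline.
import Mathlib
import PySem

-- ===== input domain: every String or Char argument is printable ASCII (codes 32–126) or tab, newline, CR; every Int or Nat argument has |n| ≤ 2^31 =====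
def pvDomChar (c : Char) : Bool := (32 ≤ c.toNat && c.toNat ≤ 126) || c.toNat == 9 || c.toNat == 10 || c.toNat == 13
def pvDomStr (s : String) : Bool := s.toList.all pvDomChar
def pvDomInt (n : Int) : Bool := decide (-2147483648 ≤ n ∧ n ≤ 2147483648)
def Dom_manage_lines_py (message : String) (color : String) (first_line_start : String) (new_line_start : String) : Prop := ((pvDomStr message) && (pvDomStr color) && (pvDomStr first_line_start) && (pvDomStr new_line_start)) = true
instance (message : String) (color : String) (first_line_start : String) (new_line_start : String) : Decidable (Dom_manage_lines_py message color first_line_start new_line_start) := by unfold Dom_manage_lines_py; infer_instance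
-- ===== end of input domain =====

-- B replaces A's split/index-counting loop with one str.replace inserting the new-line prefix after each '\n' (idiomatic, same cost).

-- ===== PORT A =====
-- the loop body: 'if not index: output += f"{first}{color}{line}\n" else: output += f"{new}{color}{line}\n"; index += 1'
def pvStepA (fls col nls : List Char) (st : Nat × List Char) (line : List Char) : Nat × List Char :=
  if st.1 = 0 then (st.1 + 1, st.2 ++ (fls ++ col ++ line ++ ['\n']))
  else (st.1 + 1, st.2 ++ (nls ++ col ++ line ++ ['\n']))

def manage_lines_py (message : String) (color : String) (first_line_start : String) (new_line_start : String) : String :=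
  String.ofList
    (((PySem.Chars.splitOn message.toList ['\n']).foldl
        (pvStepA first_line_start.toList color.toList new_line_start.toList) (0, [])).2)

-- ===== PORT B =====
def manage_lines_py_alt (message : String) (color : String) (first_line_start : String) (new_line_start : String) : String :=
  String.ofList
    (first_line_start.toList ++ color.toList ++
      PySem.Chars.replace message.toList ['\n'] ('\n' :: (new_line_start.toList ++ color.toList)) ++ ['\n'])

-- ===== PRECONDITION & SPEC =====
def Spec_manage_lines_py (message : String) (color : String) (first_line_start : String) (new_line_start : String) (out : String) : Prop := out = manage_lines_py_alt message color first_line_start new_line_start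
instance (message : String) (color : String) (first_line_start : String) (new_line_start : String) (out : String) : Decidable (Spec_manage_lines_py message color first_line_start new_line_start out) := by unfold Spec_manage_lines_py; infer_instance

-- ===== CLAIM (what is proved, stated in full; the proofs are below) =====
def Claim_equal_manage_lines_py : Prop := ∀ (message : String) (color : String) (first_line_start : String) (new_line_start : String), Dom_manage_lines_py message color first_line_start new_line_start → Spec_manage_lines_py message color first_line_start new_line_start (manage_lines_py message color first_line_start new_line_start)

-- ===== LEMMAS AND PROOFS =====

/-- The lines of `l` split at `'\n'` (always nonempty). -/
def pvLines : List Char → List (List Char)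
  | [] => [[]]
  | c :: t =>
    if c = '\n' then [] :: pvLines t
    else
      match pvLines t with
      | [] => [[c]]
      | x :: xs => (c :: x) :: xs

lemma pvLines_ne_nil (l : List Char) : pvLines l ≠ [] := by
  cases l with
  | nil => simp [pvLines]
  | cons c t =>
    simp only [pvLines]
    split
    · simp
    · cases h : pvLines t <;> simp

def pvConsFst (p : List Char) : List (List Char) → List (List Char)
  | [] => [p]
  | x :: xs => (p ++ x) :: xs

lemma splitOn_go_eq (fuel : Nat) (l cur : List Char) (acc' : List (List Char))
    (h : l.length < fuel) :
    PySem.Chars.splitOn.go ['\n'] fuel l cur acc' = acc'.reverse ++ pvConsFst cur.reverse (pvLines l) := by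
  induction fuel generalizing l cur acc' with
  | zero => omega
  | succ f ih =>
    cases l with
    | nil => simp [PySem.Chars.splitOn.go, pvLines, pvConsFst]
    | cons c t =>
      by_cases hc : c = '\n'
      · subst hc
        rw [show PySem.Chars.splitOn.go ['\n'] (f+1) ('\n' :: t) cur acc'
              = PySem.Chars.splitOn.go ['\n'] f (List.drop 1 ('\n' :: t)) [] (cur.reverse :: acc') by
            simp [PySem.Chars.splitOn.go, List.isPrefixOf]]
        rw [ih _ _ _ (by simpa using Nat.lt_of_succ_lt_succ h)]
        have hne := pvLines_ne_nil t
        cases ht : pvLines t with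
        | nil => exact absurd ht hne
        | cons x xs => simp [pvLines, pvConsFst, ht]
      · rw [show PySem.Chars.splitOn.go ['\n'] (f+1) (c :: t) cur acc'
              = PySem.Chars.splitOn.go ['\n'] f t (c :: cur) acc' by
            simp only [PySem.Chars.splitOn.go, List.isPrefixOf]
            rw [if_neg (by simp; exact fun hh => hc hh.symm)]]
        rw [ih _ _ _ (by simpa using Nat.lt_of_succ_lt_succ h)]
        have hne := pvLines_ne_nil t
        cases ht : pvLines t with
        | nil => exact absurd ht hne
        | cons x xs => simp [pvLines, pvConsFst, hc, ht]

lemma splitOn_eq_pvLines (s : List Char) : PySem.Chars.splitOn s ['\n'] = pvLines s := by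
  unfold PySem.Chars.splitOn
  rw [splitOn_go_eq (s.length + 1) s [] [] (Nat.lt_succ_self _)]
  have hne := pvLines_ne_nil s
  cases h : pvLines s with
  | nil => exact absurd h hne
  | cons x xs => simp [pvConsFst]

/-- `s.replace("\n", nw)` as a plain structural recursion. -/
def pvRepl (nw : List Char) : List Char → List Char
  | [] => []
  | c :: t => if c = '\n' then nw ++ pvRepl nw t else c :: pvRepl nw t

lemma replace_go_eq (nw : List Char) (fuel : Nat) (l acc : List Char) (h : l.length ≤ fuel) :
    PySem.Chars.replace.go ['\n'] nw fuel l acc = acc.reverse ++ pvRepl nw l := by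
  induction fuel generalizing l acc with
  | zero =>
    have : l = [] := List.eq_nil_of_length_eq_zero (Nat.le_zero.mp h)
    subst this
    simp [PySem.Chars.replace.go, pvRepl]
  | succ f ih =>
    cases l with
    | nil => simp [PySem.Chars.replace.go, pvRepl]
    | cons c t =>
      by_cases hc : c = '\n'
      · subst hc
        rw [show PySem.Chars.replace.go ['\n'] nw (f+1) ('\n' :: t) acc
              = PySem.Chars.replace.go ['\n'] nw f (List.drop 1 ('\n' :: t)) (nw.reverse ++ acc) by
            simp [PySem.Chars.replace.go, List.isPrefixOf]]
        rw [ih _ _ (by simpa using Nat.le_of_succ_le_succ h)]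
        simp [pvRepl]
      · rw [show PySem.Chars.replace.go ['\n'] nw (f+1) (c :: t) acc
              = PySem.Chars.replace.go ['\n'] nw f t (c :: acc) by
            simp only [PySem.Chars.replace.go, List.isPrefixOf]
            rw [if_neg (by simp; exact fun hh => hc hh.symm)]]
        rw [ih _ _ (by simpa using Nat.le_of_succ_le_succ h)]
        simp [pvRepl, hc]

lemma replace_eq_pvRepl (s nw : List Char) : PySem.Chars.replace s ['\n'] nw = pvRepl nw s := by
  unfold PySem.Chars.replace
  rw [if_neg (by simp)]
  exact replace_go_eq nw s.length s [] (Nat.le_refl _)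

/-- A's loop after the first iteration: index is positive, so every line gets the new-line prefix. -/
lemma foldl_stepA_pos (fls col nls : List Char) (rest : List (List Char)) (k : Nat) (out : List Char) :
    (rest.foldl (pvStepA fls col nls) (k + 1, out)).2
      = out ++ rest.flatMap (fun li => nls ++ col ++ li ++ ['\n']) := by
  induction rest generalizing k out with
  | nil => simp
  | cons r rs ih =>
    simp only [List.foldl_cons, pvStepA]
    rw [if_neg (Nat.succ_ne_zero k), ih]
    simp

/-- B's replacement, with the trailing newline, is exactly A's per-line output. -/
lemma pvRepl_out (pre : List Char) (m : List Char) :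
    pvRepl ('\n' :: pre) m ++ ['\n']
      = (pvLines m).head! ++ ['\n'] ++ (pvLines m).tail.flatMap (fun li => pre ++ li ++ ['\n']) := by
  induction m with
  | nil => simp [pvRepl, pvLines]
  | cons c t ih =>
    by_cases hc : c = '\n'
    · subst hc
      have hne := pvLines_ne_nil t
      cases ht : pvLines t with
      | nil => exact absurd ht hne
      | cons x xs =>
        rw [show pvRepl ('\n' :: pre) ('\n' :: t) = ('\n' :: pre) ++ pvRepl ('\n' :: pre) t from by
              simp [pvRepl]]
        rw [show pvLines ('\n' :: t) = [] :: pvLines t from by simp [pvLines]]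
        simp only [List.cons_append, List.append_assoc]
        rw [ih, ht]
        simp
    · have hne := pvLines_ne_nil t
      cases ht : pvLines t with
      | nil => exact absurd ht hne
      | cons x xs =>
        rw [show pvRepl ('\n' :: pre) (c :: t) = c :: pvRepl ('\n' :: pre) t from by
              simp [pvRepl, hc]]
        rw [show pvLines (c :: t) = (c :: x) :: xs from by simp [pvLines, hc, ht]]
        rw [List.cons_append, ih, ht]
        simp

-- ===== VERDICT (by name: the statement is the Claim_ definition above) =====
theorem manage_lines_py_spec : Claim_equal_manage_lines_py := by
  intro message color first_line_start new_line_start _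
  unfold Spec_manage_lines_py manage_lines_py manage_lines_py_alt
  rw [splitOn_eq_pvLines, replace_eq_pvRepl]
  have hne := pvLines_ne_nil message.toList
  cases h : pvLines message.toList with
  | nil => exact absurd h hne
  | cons x xs =>
    have hrepl := pvRepl_out (new_line_start.toList ++ color.toList) message.toList
    rw [h] at hrepl
    simp only [List.head!, List.tail] at hrepl
    congr 1
    rw [List.foldl_cons]
    show (xs.foldl (pvStepA _ _ _) (pvStepA _ _ _ (0, []) x)).2 = _
    rw [show pvStepA first_line_start.toList color.toList new_line_start.toList (0, []) x
          = (1, first_line_start.toList ++ color.toList ++ x ++ ['\n']) by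
        simp [pvStepA]]
    rw [foldl_stepA_pos]
    simp only [List.append_assoc] at hrepl ⊢
    rw [hrepl]
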